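-- pv_equiv track=rewrite | github.com/robotodo-platform/robotodo-isaac | packages/tensorspecs/__init__.py | make_size_mapping
-- ===== SOURCE A (Python) =====
-- from typing import Sequence, Hashable
-- from typing import Collection, Hashable, Mapping, NamedTuple
-- from typing import Sequence, TypeAlias, Hashable, Mapping
-- from typing import NamedTuple, Iterable, Collection, Hashable
-- from typing import Any, Iterable, Mapping, Literal, Type, Hashable, Annotated, Collection
--
-- def make_size_mapping(
--     dims: Sequence[Hashable],
--     sizes: Sequence[int],
--     optional_dims: Sequence[Hashable] = tuple(),
-- ):
--     """
--     TODO doc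
--     """
--
--     if len(dims) < len(sizes):
--         return None
--
--     if len(dims) == len(sizes):
--         return dict(zip(dims, sizes))
--
--     for i, dim in enumerate(dims):
--         rest = make_size_mapping(
--             dims=dims[i + 1:],
--             sizes=sizes[i + 1:],
--             optional_dims=optional_dims,
--         )
--         if rest is None:
--             if dim in optional_dims:
--                 rest = make_size_mapping(
--                     dims=dims[i + 1:],
--                     sizes=sizes[i:],
--                     optional_dims=optional_dims,
--                 )
--                 return {
--                     dims[i]: None,
--                     **(rest if rest is not None else dict()),
--                 }
--         else:
--             if i >= len(sizes):
--                 if dim in optional_dims: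
--                     return {
--                         dims[i]: None,
--                         **rest,
--                     }
--                 return None
--             return {
--                 dims[i]: sizes[i],
--                 **rest,
--             }
-- ===== SOURCE B (Python) =====
-- def make_size_mapping(
--     dims,
--     sizes,
--     optional_dims=tuple(),
-- ):
--     """Memoized top-down recursion over suffix-index pairs (p, q) instead of A's
--     overlapping recursion on list slices."""
--     n, m = len(dims), len(sizes)
--     opt = set(optional_dims)
--     memo = {}
--
--     def g(p, q):
--         # value for the sub-problem (dims[p:], sizes[q:])
--         if q > m:
--             q = m
--         key = (p, q)
--         if key in memo:
--             return memo[key]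
--         if n - p < m - q:
--             res = None
--         elif n - p == m - q:
--             res = dict(zip(dims[p:], sizes[q:]))
--         else:
--             res = None
--             for j in range(n - p):
--                 i = p + j
--                 rest = g(i + 1, q + j + 1)
--                 if rest is None:
--                     if dims[i] in opt:
--                         rest2 = g(i + 1, q + j)
--                         res = {dims[i]: None, **(rest2 if rest2 is not None else {})}
--                         break
--                 else:
--                     if q + j >= m:
--                         res = {dims[i]: None, **rest} if dims[i] in opt else None
--                         break
--                     res = {dims[i]: sizes[q + j], **rest}
--                     break
--         memo[key] = res
--         return res
--
--     return g(0, 0)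
-- ===== Notes on version B (the rewrite author's own statement) =====
-- stated objective: alternative
-- what changed: Replaces A's overlapping recursion on list slices by a memoized top-down recursion over suffix-index pairs (p, q), so each sub-problem is computed at most once (polynomial worst case where A's recursion is exponential); on the common equal-length/first-try inputs both are linear-time, so no overall speed is claimed.
import Mathlib
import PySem

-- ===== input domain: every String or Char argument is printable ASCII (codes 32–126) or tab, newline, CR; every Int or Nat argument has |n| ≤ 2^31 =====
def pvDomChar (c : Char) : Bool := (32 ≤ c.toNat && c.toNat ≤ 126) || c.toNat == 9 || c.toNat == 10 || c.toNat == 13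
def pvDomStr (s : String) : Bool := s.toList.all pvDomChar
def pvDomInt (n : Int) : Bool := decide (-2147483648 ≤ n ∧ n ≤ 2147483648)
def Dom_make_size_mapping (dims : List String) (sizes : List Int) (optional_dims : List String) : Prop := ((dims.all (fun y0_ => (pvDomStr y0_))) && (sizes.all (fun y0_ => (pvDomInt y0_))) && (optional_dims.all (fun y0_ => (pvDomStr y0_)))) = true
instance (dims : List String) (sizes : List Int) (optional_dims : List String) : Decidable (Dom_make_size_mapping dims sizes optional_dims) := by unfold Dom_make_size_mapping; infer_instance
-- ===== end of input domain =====

-- B replaces A's overlapping recursion on list slices by a memoized top-down recursion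
-- over suffix-index pairs (p, q): each sub-problem is computed at most once (alternative
-- algorithm; polynomial worst case where A's recursion recomputes suffix sub-problems).

-- shared dict-building helpers (Python dict displays, used verbatim by both sources):
-- {k: v, **rest}  (insert k first, then the items of rest in order; overwrite keeps position)
def msmDictMerge (k : String) (v : Option Int) (rest : List (String × Option Int)) : List (String × Option Int) :=
  (rest.foldl (fun d p => d.insert p.1 p.2) ((PySem.Dict.empty : PySem.Dict String (Option Int)).insert k v)).items
-- dict(zip(dims, sizes))
def msmDictZip (dims : List String) (sizes : List Int) : List (String × Option Int) :=
  ((dims.zip sizes).foldl (fun d p => d.insert p.1 (some p.2)) (PySem.Dict.empty : PySem.Dict String (Option Int))).items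

-- ===== PORT A =====
-- slices dims[i+1:], sizes[i+1:], sizes[i:] are List.drop (nonnegative slice start, exact);
-- dims[i], sizes[i] are getD under the loop's/branch's in-range guard (exact there).
mutual
def make_size_mapping (dims : List String) (sizes : List Int) (optional_dims : List String) : Option (List (String × Option Int)) :=
  if dims.length < sizes.length then none
  else if dims.length = sizes.length then some (msmDictZip dims sizes)
  else msmLoopA dims sizes optional_dims 0
termination_by (dims.length, dims.length + 1)

-- the 'for i, dim in enumerate(dims)' loop of A (falls off the end → None)
def msmLoopA (dims : List String) (sizes : List Int) (optional_dims : List String) (i : Nat) : Option (List (String × Option Int)) :=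
  if h : i < dims.length then
    match make_size_mapping (dims.drop (i+1)) (sizes.drop (i+1)) optional_dims with
    | none =>
      if dims.getD i "" ∈ optional_dims then
        some (msmDictMerge (dims.getD i "") none
          ((make_size_mapping (dims.drop (i+1)) (sizes.drop i) optional_dims).getD []))
      else msmLoopA dims sizes optional_dims (i+1)
    | some r =>
      if sizes.length ≤ i then
        if dims.getD i "" ∈ optional_dims then some (msmDictMerge (dims.getD i "") none r)
        else none
      else some (msmDictMerge (dims.getD i "") (some (sizes.getD i 0)) r)
  else none
termination_by (dims.length, dims.length - i)
decreasing_by all_goals simp_all [Prod.lex_iff]; omega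
end

-- ===== PORT B =====
-- the memo dict maps a state (p, q) (with q already clamped to len(sizes)) to its result;
-- it is threaded through in place of Python's mutable closure dict
mutual
-- body of B's memoized g(p, q); the clamp 'if q > m: q = m' is min
def msmGB (dims : List String) (sizes : List Int) (optSet : List String)
    (memo : PySem.Dict (Nat × Nat) (Option (List (String × Option Int)))) (p q0 : Nat) :
    Option (List (String × Option Int)) × PySem.Dict (Nat × Nat) (Option (List (String × Option Int))) :=
  match memo.get? (p, min q0 sizes.length) with
  | some r => (r, memo)
  | none =>
    match
      (if dims.length - p < sizes.length - min q0 sizes.length then (none, memo)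
       else if dims.length - p = sizes.length - min q0 sizes.length then
         (some (msmDictZip (dims.drop p) (sizes.drop (min q0 sizes.length))), memo)
       else msmGLoopB dims sizes optSet memo p (min q0 sizes.length) 0) with
    | (res, memo') => (res, memo'.insert (p, min q0 sizes.length) res)
termination_by (dims.length - p, dims.length - p + 1)

-- B's 'for j in range(n - p)' loop (i = p + j); res-then-break returns directly
def msmGLoopB (dims : List String) (sizes : List Int) (optSet : List String)
    (memo : PySem.Dict (Nat × Nat) (Option (List (String × Option Int)))) (p q j : Nat) :
    Option (List (String × Option Int)) × PySem.Dict (Nat × Nat) (Option (List (String × Option Int))) :=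
  if h : j < dims.length - p then
    match msmGB dims sizes optSet memo (p+j+1) (q+j+1) with
    | (none, memo1) =>
      if dims.getD (p+j) "" ∈ optSet then
        (match msmGB dims sizes optSet memo1 (p+j+1) (q+j) with
         | (rest2, memo2) =>
           (some (msmDictMerge (dims.getD (p+j) "") none (rest2.getD [])), memo2))
      else msmGLoopB dims sizes optSet memo1 p q (j+1)
    | (some r, memo1) =>
      if sizes.length ≤ q + j then
        (if dims.getD (p+j) "" ∈ optSet then some (msmDictMerge (dims.getD (p+j) "") none r)
         else none, memo1)
      else (some (msmDictMerge (dims.getD (p+j) "") (some (sizes.getD (q+j) 0)) r), memo1)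
  else (none, memo)
termination_by (dims.length - p, dims.length - p - j)
decreasing_by all_goals simp_all [Prod.lex_iff]; omega
end

def make_size_mapping_alt (dims : List String) (sizes : List Int) (optional_dims : List String) : Option (List (String × Option Int)) :=
  -- opt = set(optional_dims); memo = {}; return g(0, 0)
  (msmGB dims sizes (PySem.Set.ofList optional_dims) PySem.Dict.empty 0 0).1

-- ===== PRECONDITION & SPEC =====
def Spec_make_size_mapping (dims : List String) (sizes : List Int) (optional_dims : List String) (out : Option (List (String × Option Int))) : Prop := out = make_size_mapping_alt dims sizes optional_dims
instance (dims : List String) (sizes : List Int) (optional_dims : List String) (out : Option (List (String × Option Int))) : Decidable (Spec_make_size_mapping dims sizes optional_dims out) := by unfold Spec_make_size_mapping; infer_instance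

-- ===== CLAIM (what is proved, stated in full; the proofs are below) =====
def Claim_equal_make_size_mapping : Prop := ∀ (dims : List String) (sizes : List Int) (optional_dims : List String), Dom_make_size_mapping dims sizes optional_dims → Spec_make_size_mapping dims sizes optional_dims (make_size_mapping dims sizes optional_dims)

-- ===== LEMMAS AND PROOFS =====

-- the memo invariant: every cached entry is the value A computes on the same suffix pair
def MsmMemoOK (dims : List String) (sizes : List Int) (optional_dims : List String)
    (memo : PySem.Dict (Nat × Nat) (Option (List (String × Option Int)))) : Prop :=
  ∀ p q r, memo.get? (p, q) = some r →
    r = make_size_mapping (dims.drop p) (sizes.drop q) optional_dims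

-- set(optional_dims) and the list optional_dims agree on membership
theorem msm_mem_optSet (x : String) (optional_dims : List String) :
    (x ∈ PySem.Set.ofList optional_dims) ↔ x ∈ optional_dims :=
  PySem.Set.mem_ofList ..

theorem msm_gLoopB_correct (dims : List String) (sizes : List Int) (optional_dims : List String)
    (p q : Nat) (hq : q ≤ sizes.length)
    (IH : ∀ p' q0 memo, MsmMemoOK dims sizes optional_dims memo → p < p' →
      (msmGB dims sizes (PySem.Set.ofList optional_dims) memo p' q0).1
        = make_size_mapping (dims.drop p') (sizes.drop (min q0 sizes.length)) optional_dims
      ∧ MsmMemoOK dims sizes optional_dims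
          (msmGB dims sizes (PySem.Set.ofList optional_dims) memo p' q0).2) :
    ∀ j memo, MsmMemoOK dims sizes optional_dims memo →
      (msmGLoopB dims sizes (PySem.Set.ofList optional_dims) memo p q j).1
        = msmLoopA (dims.drop p) (sizes.drop q) optional_dims j
      ∧ MsmMemoOK dims sizes optional_dims
          (msmGLoopB dims sizes (PySem.Set.ofList optional_dims) memo p q j).2 := by
  suffices H : ∀ f j memo, dims.length - p ≤ j + f → MsmMemoOK dims sizes optional_dims memo →
      (msmGLoopB dims sizes (PySem.Set.ofList optional_dims) memo p q j).1
        = msmLoopA (dims.drop p) (sizes.drop q) optional_dims j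
      ∧ MsmMemoOK dims sizes optional_dims
          (msmGLoopB dims sizes (PySem.Set.ofList optional_dims) memo p q j).2 by
    intro j memo hm; exact H (dims.length) j memo (by omega) hm
  intro f
  induction f with
  | zero =>
    intro j memo hj hm
    rw [msmGLoopB, dif_neg (by omega), msmLoopA,
      dif_neg (show ¬ j < (dims.drop p).length by simp only [List.length_drop]; omega)]
    exact ⟨rfl, hm⟩
  | succ f ih =>
    intro j memo hj hm
    by_cases h : j < dims.length - p
    · rw [msmGLoopB, dif_pos h, msmLoopA,
        dif_pos (show j < (dims.drop p).length by simp only [List.length_drop]; omega)]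
      have eA1 : (dims.drop p).drop (j+1) = dims.drop (p+j+1) := by
        rw [List.drop_drop]; congr 1 <;> omega
      have eA2 : (sizes.drop q).drop (j+1) = sizes.drop (q+j+1) := by
        rw [List.drop_drop]; congr 1 <;> omega
      have eA3 : (sizes.drop q).drop j = sizes.drop (q+j) := by
        rw [List.drop_drop]
      have hmin1 : sizes.drop (min (q+j+1) sizes.length) = sizes.drop (q+j+1) := by
        by_cases hle : q+j+1 ≤ sizes.length
        · rw [min_eq_left hle]
        · rw [min_eq_right (by omega), List.drop_eq_nil_of_le (by omega),
            List.drop_eq_nil_of_le (by omega)]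
      have hmin2 : sizes.drop (min (q+j) sizes.length) = sizes.drop (q+j) := by
        by_cases hle : q+j ≤ sizes.length
        · rw [min_eq_left hle]
        · rw [min_eq_right (by omega), List.drop_eq_nil_of_le (by omega),
            List.drop_eq_nil_of_le (by omega)]
      have ed : (dims.drop p).getD j "" = dims.getD (p+j) "" := by
        simp [List.getD_eq_getElem?_getD, List.getElem?_drop]
      have es : (sizes.drop q).getD j 0 = sizes.getD (q+j) 0 := by
        simp [List.getD_eq_getElem?_getD, List.getElem?_drop]
      obtain ⟨h1v, h1m⟩ := IH (p+j+1) (q+j+1) memo hm (by omega)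
      rw [hmin1] at h1v
      rcases hgb : msmGB dims sizes (PySem.Set.ofList optional_dims) memo (p+j+1) (q+j+1)
        with ⟨rest, memo1⟩
      rw [hgb] at h1v h1m
      dsimp only at h1v h1m
      rw [eA1, eA2, eA3, ed, es, ← h1v]
      cases rest with
      | none =>
        dsimp only
        by_cases hmem : dims.getD (p+j) "" ∈ optional_dims
        · rw [if_pos ((msm_mem_optSet _ _).mpr hmem), if_pos hmem]
          obtain ⟨h2v, h2m⟩ := IH (p+j+1) (q+j) memo1 h1m (by omega)
          rw [hmin2] at h2v
          rcases hgb2 : msmGB dims sizes (PySem.Set.ofList optional_dims) memo1 (p+j+1) (q+j)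
            with ⟨rest2, memo2⟩
          rw [hgb2] at h2v h2m
          dsimp only at h2v h2m
          rw [h2v]
          exact ⟨rfl, h2m⟩
        · rw [if_neg (fun hx => hmem ((msm_mem_optSet _ _).mp hx)), if_neg hmem]
          exact ih (j+1) memo1 (by omega) h1m
      | some r =>
        dsimp only
        have ec : ((sizes.drop q).length ≤ j) ↔ (sizes.length ≤ q + j) := by
          simp only [List.length_drop]; omega
        by_cases hc : sizes.length ≤ q + j
        · rw [if_pos hc, if_pos (ec.mpr hc)]
          by_cases hmem : dims.getD (p+j) "" ∈ optional_dims
          · rw [if_pos ((msm_mem_optSet _ _).mpr hmem), if_pos hmem]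
            exact ⟨rfl, h1m⟩
          · rw [if_neg (fun hx => hmem ((msm_mem_optSet _ _).mp hx)), if_neg hmem]
            exact ⟨rfl, h1m⟩
        · rw [if_neg hc, if_neg (fun hx => hc (ec.mp hx))]
          exact ⟨rfl, h1m⟩
    · rw [msmGLoopB, dif_neg h, msmLoopA,
        dif_neg (show ¬ j < (dims.drop p).length by simp only [List.length_drop]; omega)]
      exact ⟨rfl, hm⟩

theorem msm_memoOK_insert (dims : List String) (sizes : List Int) (optional_dims : List String)
    (memo : PySem.Dict (Nat × Nat) (Option (List (String × Option Int)))) (p q : Nat)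
    (res : Option (List (String × Option Int)))
    (hm : MsmMemoOK dims sizes optional_dims memo)
    (hres : res = make_size_mapping (dims.drop p) (sizes.drop q) optional_dims) :
    MsmMemoOK dims sizes optional_dims (memo.insert (p, q) res) := by
  intro p' q' r' hget'
  rw [PySem.Dict.get?_insert] at hget'
  by_cases he : (p', q') = (p, q)
  · rw [if_pos he] at hget'
    cases hget'
    obtain ⟨he1, he2⟩ := Prod.mk.injEq .. ▸ he
    subst he1; subst he2
    exact hres
  · rw [if_neg he] at hget'
    exact hm _ _ _ hget'

theorem msm_gB_correct (dims : List String) (sizes : List Int) (optional_dims : List String) :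
    ∀ k p q0 memo, dims.length - p ≤ k → MsmMemoOK dims sizes optional_dims memo →
      (msmGB dims sizes (PySem.Set.ofList optional_dims) memo p q0).1
        = make_size_mapping (dims.drop p) (sizes.drop (min q0 sizes.length)) optional_dims
      ∧ MsmMemoOK dims sizes optional_dims
          (msmGB dims sizes (PySem.Set.ofList optional_dims) memo p q0).2 := by
  have main : ∀ k p q0 memo, dims.length - p ≤ k → MsmMemoOK dims sizes optional_dims memo →
      (∀ p' q0' memo', MsmMemoOK dims sizes optional_dims memo' → p < p' → p < dims.length →
        (msmGB dims sizes (PySem.Set.ofList optional_dims) memo' p' q0').1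
          = make_size_mapping (dims.drop p') (sizes.drop (min q0' sizes.length)) optional_dims
        ∧ MsmMemoOK dims sizes optional_dims
            (msmGB dims sizes (PySem.Set.ofList optional_dims) memo' p' q0').2) →
      (msmGB dims sizes (PySem.Set.ofList optional_dims) memo p q0).1
        = make_size_mapping (dims.drop p) (sizes.drop (min q0 sizes.length)) optional_dims
      ∧ MsmMemoOK dims sizes optional_dims
          (msmGB dims sizes (PySem.Set.ofList optional_dims) memo p q0).2 := by
    intro k p q0 memo hk hm hrec
    rw [msmGB]
    cases hget : PySem.Dict.get? memo (p, min q0 sizes.length) with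
    | some r =>
      dsimp only
      exact ⟨hm _ _ _ hget, hm⟩
    | none =>
      dsimp only
      have hq : min q0 sizes.length ≤ sizes.length := by omega
      by_cases h1 : dims.length - p < sizes.length - min q0 sizes.length
      · have hA : make_size_mapping (dims.drop p) (sizes.drop (min q0 sizes.length)) optional_dims
            = none := by
          rw [make_size_mapping]
          simp only [List.length_drop]
          rw [if_pos h1]
        rw [if_pos h1]
        dsimp only
        exact ⟨hA.symm, msm_memoOK_insert _ _ _ _ _ _ _ hm hA.symm⟩
      · by_cases h2 : dims.length - p = sizes.length - min q0 sizes.length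
        · have hA : make_size_mapping (dims.drop p) (sizes.drop (min q0 sizes.length)) optional_dims
              = some (msmDictZip (dims.drop p) (sizes.drop (min q0 sizes.length))) := by
            rw [make_size_mapping]
            simp only [List.length_drop]
            rw [if_neg h1, if_pos h2]
          rw [if_neg h1, if_pos h2]
          dsimp only
          exact ⟨hA.symm, msm_memoOK_insert _ _ _ _ _ _ _ hm hA.symm⟩
        · have hpn : p < dims.length := by omega
          have hA : make_size_mapping (dims.drop p) (sizes.drop (min q0 sizes.length)) optional_dims
              = msmLoopA (dims.drop p) (sizes.drop (min q0 sizes.length)) optional_dims 0 := by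
            rw [make_size_mapping]
            simp only [List.length_drop]
            rw [if_neg h1, if_neg h2]
          obtain ⟨hlv, hlm⟩ := msm_gLoopB_correct dims sizes optional_dims p (min q0 sizes.length)
            hq (fun p' q0' memo' hm' hp' => hrec p' q0' memo' hm' hp' hpn) 0 memo hm
          rcases hloop : msmGLoopB dims sizes (PySem.Set.ofList optional_dims) memo p
              (min q0 sizes.length) 0 with ⟨res, memo'⟩
          rw [hloop] at hlv hlm
          dsimp only at hlv hlm
          rw [if_neg h1, if_neg h2]
          dsimp only
          refine ⟨by rw [hlv, hA], ?_⟩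
          exact msm_memoOK_insert _ _ _ _ _ _ _ hlm (by rw [hlv, hA])
  intro k
  induction k with
  | zero =>
    intro p q0 memo hk hm
    refine main 0 p q0 memo hk hm ?_
    intro p' q0' memo' hm' hp' hpn
    exact absurd hpn (by omega)
  | succ k ih =>
    intro p q0 memo hk hm
    refine main (k+1) p q0 memo hk hm ?_
    intro p' q0' memo' hm' hp' hpn
    exact ih p' q0' memo' (by omega) hm'

-- ===== VERDICT (by name: the statement is the Claim_ definition above) =====
theorem make_size_mapping_spec : Claim_equal_make_size_mapping := by
  intro dims sizes optional_dims _
  unfold Spec_make_size_mapping make_size_mapping_alt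
  have hm0 : MsmMemoOK dims sizes optional_dims PySem.Dict.empty := by
    intro p q r hget
    rw [PySem.Dict.get?_empty] at hget
    cases hget
  have := (msm_gB_correct dims sizes optional_dims dims.length 0 0 PySem.Dict.empty
    (by omega) hm0).1
  rw [this]
  simp
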